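-- pv_equiv track=rewrite | github.com/Lee3Paul/PyLinkPred | preprocess/handle_list_matrix.py | create_vertex_origin
-- ===== SOURCE A (Python) =====
-- def create_vertex_origin(linklist):
--     """
--     从边列表中获取节点列表
--     :param linklist:
--     :return nodelist:
--     """
--     nodelist = {}
--     num = 0
--     for i in linklist:
--         if i[0] not in nodelist:
--             nodelist[i[0]] = num
--             num += 1
--         if i[1] not in nodelist:
--             nodelist[i[1]] = num
--             num += 1
--     return nodelist
-- ===== SOURCE B (Python) =====
-- def create_vertex_origin(linklist):
--     """
--     Set-and-sort strategy: collect the distinct endpoints as an (unordered) set,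
--     then recover first-appearance order by sorting the set by each node's first
--     position in the flattened endpoint sequence, and index by enumeration.
--     Correct because first-occurrence positions are distinct, so the sort order
--     is exactly first-appearance order.
--     """
--     flat = [x for edge in linklist for x in (edge[0], edge[1])]
--     nodes = sorted(set(flat), key=flat.index)
--     return {x: i for i, x in enumerate(nodes)}
-- ===== Notes on version B (the rewrite author's own statement) =====
-- stated objective: alternative
-- what changed: Replaces A's single pass with membership guards and an explicit counter by a set-and-sort strategy: collect the distinct endpoints as an unordered set, sort them by their first position in the flattened endpoint sequence (list.index), and assign indices by enumeration.
import Mathlib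
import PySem

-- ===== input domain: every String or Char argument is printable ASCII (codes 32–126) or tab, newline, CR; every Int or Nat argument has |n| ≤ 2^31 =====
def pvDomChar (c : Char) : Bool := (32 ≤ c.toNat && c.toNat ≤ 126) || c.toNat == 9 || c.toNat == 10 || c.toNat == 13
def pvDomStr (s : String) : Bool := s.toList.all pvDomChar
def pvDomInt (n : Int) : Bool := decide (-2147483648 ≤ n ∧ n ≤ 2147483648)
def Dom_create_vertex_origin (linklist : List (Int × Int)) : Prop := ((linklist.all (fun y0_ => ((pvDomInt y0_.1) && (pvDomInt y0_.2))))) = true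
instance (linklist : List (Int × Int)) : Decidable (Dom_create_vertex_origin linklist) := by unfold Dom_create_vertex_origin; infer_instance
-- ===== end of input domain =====

-- B replaces A's single guarded-insertion loop by a set-and-sort strategy: build the set of
-- endpoints, sort it by first position in the flattened sequence, enumerate (alternative, not faster).


-- ===== PORT A =====
-- A's loop body for one edge: two guarded insertions into (nodelist, num)
def cvoStep (st : PySem.Dict Int Int × Int) (i : Int × Int) : PySem.Dict Int Int × Int :=
  let st1 := if st.1.contains i.1 then st else (st.1.insert i.1 st.2, st.2 + 1)
  if st1.1.contains i.2 then st1 else (st1.1.insert i.2 st1.2, st1.2 + 1)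

def create_vertex_origin (linklist : List (Int × Int)) : List (Int × Int) :=
  (linklist.foldl cvoStep (PySem.Dict.empty, 0)).1.items

-- ===== PORT B =====
-- Source B: flat = flattened endpoints; nodes = sorted(set(flat), key=flat.index);
-- {x: i for i, x in enumerate(nodes)}.  Every member of the set occurs in flat,
-- so flat.index never raises there; '.getD 0' on index? is exact on those inputs.
def create_vertex_origin_alt (linklist : List (Int × Int)) : List (Int × Int) :=
  (PySem.List.enumerate
      (PySem.List.sorted (PySem.Set.ofList (linklist.flatMap (fun edge => [edge.1, edge.2])))
        (fun x => ((PySem.List.index? (linklist.flatMap (fun edge => [edge.1, edge.2])) x).getD 0 : Nat)))).map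
    (fun p => (p.2, p.1))

-- ===== PRECONDITION & SPEC =====
def Spec_create_vertex_origin (linklist : List (Int × Int)) (out : List (Int × Int)) : Prop := out = create_vertex_origin_alt linklist
instance (linklist : List (Int × Int)) (out : List (Int × Int)) : Decidable (Spec_create_vertex_origin linklist out) := by unfold Spec_create_vertex_origin; infer_instance

-- ===== CLAIM (what is proved, stated in full; the proofs are below) =====
def Claim_equal_create_vertex_origin : Prop := ∀ (linklist : List (Int × Int)), Dom_create_vertex_origin linklist → Spec_create_vertex_origin linklist (create_vertex_origin linklist)

-- ===== LEMMAS AND PROOFS =====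

-- the dict A has built after seeing exactly the distinct nodes `seen` (in order)
def cvoDict (seen : List Int) : PySem.Dict Int Int :=
  PySem.Dict.mk ((PySem.List.enumerate seen).map (fun p => (p.2, p.1)))

theorem cvoDict_contains (seen : List Int) (x : Int) :
    (cvoDict seen).contains x = decide (x ∈ seen) := by
  rw [PySem.Dict.contains_eq_decide_mem_keys]
  have hk : (cvoDict seen).keys = seen := by
    simp only [cvoDict, PySem.Dict.keys, List.map_map]
    exact PySem.List.map_snd_enumerate seen 0
  rw [hk]

-- one guarded insertion advances the invariant state by Set.add
def cvoStep1 (st : PySem.Dict Int Int × Int) (x : Int) : PySem.Dict Int Int × Int :=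
  if st.1.contains x then st else (st.1.insert x st.2, st.2 + 1)

theorem cvoStep_eq (st : PySem.Dict Int Int × Int) (i : Int × Int) :
    cvoStep st i = cvoStep1 (cvoStep1 st i.1) i.2 := rfl

theorem cvoStep1_inv (seen : List Int) (x : Int) :
    cvoStep1 (cvoDict seen, (seen.length : Int)) x
      = (cvoDict (PySem.Set.add seen x), ((PySem.Set.add seen x).length : Int)) := by
  by_cases hx : x ∈ seen
  · simp [cvoStep1, cvoDict_contains, hx, PySem.Set.add]
  · simp only [cvoStep1, cvoDict_contains, hx, decide_false, Bool.false_eq_true, if_false,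
      PySem.Set.add_of_not_mem hx]
    have hins : (cvoDict seen).insert x (seen.length : Int) = cvoDict (seen ++ [x]) := by
      apply PySem.Dict.ext
      rw [PySem.Dict.items_insert_of_not_contains]
      · simp [cvoDict, PySem.List.enumerate_append, PySem.List.enumerate_cons,
          PySem.List.enumerate_nil]
      · simp [cvoDict_contains, hx]
    simp [hins]

theorem cvoFold_inv (l : List Int) (seen : List Int) :
    l.foldl cvoStep1 (cvoDict seen, (seen.length : Int))
      = (cvoDict (PySem.Set.update seen l), ((PySem.Set.update seen l).length : Int)) := by
  induction l generalizing seen with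
  | nil => simp [PySem.Set.update]
  | cons x xs ih =>
      rw [List.foldl_cons, cvoStep1_inv, ih, PySem.Set.update_cons]

theorem cvoFold_pairs (linklist : List (Int × Int)) (st : PySem.Dict Int Int × Int) :
    linklist.foldl cvoStep st
      = (linklist.flatMap (fun edge => [edge.1, edge.2])).foldl cvoStep1 st := by
  induction linklist generalizing st with
  | nil => rfl
  | cons e es ih => simp [List.foldl_cons, cvoStep_eq, ih]

-- dedup l is strictly increasing in first-occurrence position, so sorting the set
-- of l's elements by that key returns exactly dedup l
theorem dedup_pairwise_index (l : List Int) :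
    (PySem.Set.ofList l).Pairwise
      (fun a b => ((PySem.List.index? l a).getD 0 : Nat) < (PySem.List.index? l b).getD 0) := by
  induction l using List.reverseRecOn with
  | nil => simp [PySem.Set.ofList]
  | append_singleton xs x ih =>
    rw [PySem.Set.ofList_append_singleton]
    by_cases hx : x ∈ xs
    · rw [PySem.Set.add_of_mem (by simpa [PySem.Set.mem_ofList] using hx)]
      refine ih.imp_of_mem ?_
      intro a b ha hb hab
      rw [PySem.List.index?_append_of_mem [x] (by simpa [PySem.Set.mem_ofList] using ha),
          PySem.List.index?_append_of_mem [x] (by simpa [PySem.Set.mem_ofList] using hb)]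
      exact hab
    · rw [PySem.Set.add_of_not_mem (by simpa [PySem.Set.mem_ofList] using hx)]
      rw [List.pairwise_append]
      refine ⟨?_, List.pairwise_singleton _ _, ?_⟩
      · refine ih.imp_of_mem ?_
        intro a b ha hb hab
        rw [PySem.List.index?_append_of_mem [x] (by simpa [PySem.Set.mem_ofList] using ha),
            PySem.List.index?_append_of_mem [x] (by simpa [PySem.Set.mem_ofList] using hb)]
        exact hab
      · intro a ha b hb
        rw [List.mem_singleton] at hb
        rw [hb]
        have haxs : a ∈ xs := by simpa [PySem.Set.mem_ofList] using ha
        rw [PySem.List.index?_append_of_mem [x] haxs,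
            PySem.List.index?_append_singleton_self xs x hx]
        obtain ⟨k, hk⟩ := Option.isSome_iff_exists.mp
          ((PySem.List.index?_isSome_iff xs a).mpr haxs)
        obtain ⟨pre, suf, hsplit, hlen, _⟩ := (PySem.List.index?_eq_some_iff xs a k).mp hk
        rw [hk]
        simp only [Option.getD_some]
        subst hsplit hlen
        simp

theorem sorted_set_eq_dedup (l : List Int) :
    PySem.List.sorted (PySem.Set.ofList l)
        (fun x => ((PySem.List.index? l x).getD 0 : Nat))
      = PySem.List.dedup l := by
  apply PySem.List.sorted_eq_of_perm_of_pairwise_lt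
  · rw [PySem.List.dedup_eq_ofList]
  · rw [PySem.List.dedup_eq_ofList]
    exact dedup_pairwise_index l

-- ===== VERDICT (by name: the statement is the Claim_ definition above) =====
theorem create_vertex_origin_spec : Claim_equal_create_vertex_origin := by
  intro linklist _
  unfold Spec_create_vertex_origin create_vertex_origin create_vertex_origin_alt
  rw [cvoFold_pairs]
  have h0 : (PySem.Dict.empty, (0 : Int))
      = (cvoDict ([] : List Int), (([] : List Int).length : Int)) := rfl
  rw [h0, cvoFold_inv, sorted_set_eq_dedup]
  have : PySem.Set.update ([] : List Int) (linklist.flatMap (fun edge => [edge.1, edge.2]))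
      = PySem.List.dedup (linklist.flatMap (fun edge => [edge.1, edge.2])) := by
    simp [PySem.Set.update_nil_left]
  rw [this]
  rfl
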